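-- pv_equiv track=rewrite | github.com/8fdafs2/Codewars-Solu-Python | src/kyu5_Scramblies.py | scramble_01
-- ===== SOURCE A (Python) =====
-- from collections import Counter
--
-- def scramble_01(s1, s2):
--     """
--     counter comparison one-by-one
--     """
--     hashtab_s1 = Counter(s1)
--     hashtab_s2 = Counter(s2)
--     for c in hashtab_s2:
--         if c not in hashtab_s1:
--             return False
--         if hashtab_s1[c] < hashtab_s2[c]:
--             return False
--
--     return True
-- ===== SOURCE B (Python) =====
-- def scramble_01(s1, s2):
--     a = sorted(s1)
--     b = sorted(s2)
--     i, n = 0, len(a)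
--     for ch in b:
--         while i < n and a[i] < ch:
--             i += 1
--         if i == n or a[i] != ch:
--             return False
--         i += 1
--     return True
-- ===== Notes on version B (the rewrite author's own statement) =====
-- stated objective: alternative
-- what changed: B does no counting at all: it sorts both strings and runs a two-pointer merge scan checking that sorted(s2) embeds in sorted(s1) as a sub-multiset, instead of A's two Counters compared per key.
import Mathlib
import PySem

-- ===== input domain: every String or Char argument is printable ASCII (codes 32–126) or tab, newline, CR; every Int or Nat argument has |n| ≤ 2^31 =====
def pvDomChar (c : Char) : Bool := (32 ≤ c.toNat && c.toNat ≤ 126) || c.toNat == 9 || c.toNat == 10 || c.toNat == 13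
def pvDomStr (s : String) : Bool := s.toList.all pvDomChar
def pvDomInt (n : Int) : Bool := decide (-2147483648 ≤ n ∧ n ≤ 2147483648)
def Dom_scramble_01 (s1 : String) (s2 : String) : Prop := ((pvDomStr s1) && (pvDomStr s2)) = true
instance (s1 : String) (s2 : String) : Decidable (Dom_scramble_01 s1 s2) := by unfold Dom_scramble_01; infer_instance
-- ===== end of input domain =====

-- B replaces A's two Counters + per-key comparison by sorting both strings and a
-- two-pointer merge scan, with no counting at all (objective: alternative).

-- ===== PORT A =====
-- the 'for c in hashtab_s2' loop with its two early 'return False' branches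
def scrambleLoopA (h1 h2 : PySem.Dict Char Int) : List Char → Bool
  | [] => true
  | c :: rest =>
      if h1.contains c = false then false
      else if h1.getD c 0 < h2.getD c 0 then false
      else scrambleLoopA h1 h2 rest

def scramble_01 (s1 : String) (s2 : String) : Bool :=
  let hashtab_s1 := PySem.Dict.counter s1.toList
  let hashtab_s2 := PySem.Dict.counter s2.toList
  scrambleLoopA hashtab_s1 hashtab_s2 hashtab_s2.keys

-- ===== PORT B =====
-- the 'for ch in b' loop with its inner 'while' advancing i: consuming an element of
-- the first list is the Python 'i += 1'; the empty-first-list case is 'i == n'.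
def scrambleMergeB : List Char → List Char → Bool
  | _, [] => true
  | [], _ :: _ => false
  | x :: xs, ch :: ys =>
      if x < ch then scrambleMergeB xs (ch :: ys)       -- while a[i] < ch: i += 1
      else if x = ch then scrambleMergeB xs ys          -- match: i += 1, next ch
      else false                                        -- a[i] > ch: return False

def scramble_01_alt (s1 : String) (s2 : String) : Bool :=
  let a := PySem.List.sorted s1.toList (fun c => c) false
  let b := PySem.List.sorted s2.toList (fun c => c) false
  scrambleMergeB a b

-- ===== PRECONDITION & SPEC =====
def Spec_scramble_01 (s1 : String) (s2 : String) (out : Bool) : Prop := out = scramble_01_alt s1 s2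
instance (s1 : String) (s2 : String) (out : Bool) : Decidable (Spec_scramble_01 s1 s2 out) := by unfold Spec_scramble_01; infer_instance

-- ===== CLAIM (what is proved, stated in full; the proofs are below) =====
def Claim_equal_scramble_01 : Prop := ∀ (s1 : String) (s2 : String), Dom_scramble_01 s1 s2 → Spec_scramble_01 s1 s2 (scramble_01 s1 s2)

-- ===== LEMMAS AND PROOFS =====

-- A's loop is the conjunction of its per-key tests
theorem scrambleLoopA_eq_true_iff (h1 h2 : PySem.Dict Char Int) (ks : List Char) :
    scrambleLoopA h1 h2 ks = true ↔
      ∀ c ∈ ks, h1.contains c = true ∧ h2.getD c 0 ≤ h1.getD c 0 := by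
  induction ks with
  | nil => simp [scrambleLoopA]
  | cons c rest ih =>
      simp only [scrambleLoopA, List.mem_cons]
      by_cases hc : h1.contains c = true
      · rw [if_neg (by simp [hc])]
        by_cases hlt : h1.getD c 0 < h2.getD c 0
        · rw [if_pos hlt]
          constructor
          · intro h; exact absurd h (by simp)
          · intro h; exact absurd ((h c (Or.inl rfl)).2) (not_le.mpr hlt)
        · rw [if_neg hlt, ih]
          constructor
          · intro h c' hm
            rcases hm with rfl | hm
            · exact ⟨hc, le_of_not_gt hlt⟩
            · exact h c' hm
          · intro h c' hm; exact h c' (Or.inr hm)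
      · have hcf : h1.contains c = false := by
          cases h : h1.contains c
          · rfl
          · exact absurd h hc
        rw [if_pos hcf]
        constructor
        · intro h; exact absurd h (by simp)
        · intro h; exact absurd ((h c (Or.inl rfl)).1) (by simp [hcf])

-- the common characterisation of A: every character of s2 is covered by s1's multiplicities
theorem scramble_01_eq_true_iff (s1 s2 : String) :
    scramble_01 s1 s2 = true ↔ ∀ c, (s2.toList.count c : Int) ≤ (s1.toList.count c : Int) := by
  unfold scramble_01
  rw [scrambleLoopA_eq_true_iff]
  constructor
  · intro h c
    by_cases hm : c ∈ s2.toList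
    · have hk : c ∈ (PySem.Dict.counter s2.toList).keys := by
        rw [PySem.Dict.keys_counter, PySem.Set.mem_ofList]; exact hm
      have := (h c hk).2
      simpa [PySem.Dict.getD_counter] using this
    · simp [List.count_eq_zero_of_not_mem hm]
  · intro h c hk
    rw [PySem.Dict.keys_counter, PySem.Set.mem_ofList] at hk
    have hc2 : 1 ≤ s2.toList.count c := List.one_le_count_iff.mpr hk
    have hle := h c
    constructor
    · rw [PySem.Dict.contains_counter]
      simp only [List.contains_iff_mem]
      have : 1 ≤ s1.toList.count c := by omega
      exact List.one_le_count_iff.mp this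
    · simpa [PySem.Dict.getD_counter] using hle

-- B's merge scan on two ≤-sorted lists decides sub-multiset containment
theorem scrambleMergeB_eq_true_iff (a : List Char) : ∀ (b : List Char),
    a.Pairwise (· ≤ ·) → b.Pairwise (· ≤ ·) →
    (scrambleMergeB a b = true ↔ ∀ c, b.count c ≤ a.count c) := by
  induction a with
  | nil =>
      intro b _ _
      cases b with
      | nil => simp [scrambleMergeB]
      | cons y ys =>
          simp only [scrambleMergeB, List.count_nil]
          constructor
          · intro h; exact absurd h (by simp)
          · intro h
            have := h y
            simp [List.count_cons_self] at this
  | cons x xs ih =>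
      intro b ha hb
      have haxs : xs.Pairwise (· ≤ ·) := (List.pairwise_cons.mp ha).2
      have hax : ∀ z ∈ xs, x ≤ z := (List.pairwise_cons.mp ha).1
      cases b with
      | nil => simp [scrambleMergeB]
      | cons y ys =>
          have hbys : ys.Pairwise (· ≤ ·) := (List.pairwise_cons.mp hb).2
          have hby : ∀ z ∈ ys, y ≤ z := (List.pairwise_cons.mp hb).1
          simp only [scrambleMergeB]
          by_cases hlt : x < y
          · rw [if_pos hlt, ih (y :: ys) haxs hb]
            -- x < every element of y::ys, so x never occurs in b; counts over x::xs and xs agree elsewhere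
            constructor
            · intro h c
              have := h c
              by_cases hcx : c = x
              · subst hcx
                have hnm : c ∉ y :: ys := by
                  intro hm
                  rcases List.mem_cons.mp hm with rfl | hm
                  · exact lt_irrefl _ hlt
                  · exact absurd (lt_of_lt_of_le hlt (hby _ hm)) (lt_irrefl c)
                simp [List.count_eq_zero_of_not_mem hnm]
              · simp only [List.count_cons, beq_iff_eq, if_neg (Ne.symm hcx)]; simp only [List.count_cons, beq_iff_eq, if_neg (Ne.symm hcx)] at this; omega
            · intro h c
              have := h c
              by_cases hcx : c = x
              · subst hcx
                have hnm : c ∉ y :: ys := by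
                  intro hm
                  rcases List.mem_cons.mp hm with rfl | hm
                  · exact lt_irrefl _ hlt
                  · exact absurd (lt_of_lt_of_le hlt (hby _ hm)) (lt_irrefl c)
                simp [List.count_eq_zero_of_not_mem hnm]
              · simp only [List.count_cons, beq_iff_eq, if_neg (Ne.symm hcx)] at this ⊢; omega
          · rw [if_neg hlt]
            by_cases heq : x = y
            · rw [if_pos heq, ih ys haxs hbys]
              subst heq
              constructor
              · intro h c
                have := h c
                by_cases hcx : c = x
                · subst hcx
                  rw [List.count_cons_self, List.count_cons_self]; omega
                · simp only [List.count_cons, beq_iff_eq, if_neg (Ne.symm hcx)] at this ⊢; omega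
              · intro h c
                have := h c
                by_cases hcx : c = x
                · subst hcx
                  rw [List.count_cons_self, List.count_cons_self] at this; omega
                · simp only [List.count_cons, beq_iff_eq, if_neg (Ne.symm hcx)] at this ⊢; omega
            · rw [if_neg heq]
              -- here y < x: y occurs in b but not in x::xs
              have hyx : y < x := lt_of_le_of_ne (le_of_not_gt hlt) (fun h => heq h.symm)
              constructor
              · intro h; exact absurd h (by simp)
              · intro h
                exfalso
                have hnm : y ∉ x :: xs := by
                  intro hm
                  rcases List.mem_cons.mp hm with rfl | hm
                  · exact lt_irrefl _ hyx
                  · exact absurd (lt_of_lt_of_le hyx (hax _ hm)) (lt_irrefl y)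
                have := h y
                rw [List.count_eq_zero_of_not_mem hnm, List.count_cons_self] at this
                omega

theorem scramble_01_alt_eq_true_iff (s1 s2 : String) :
    scramble_01_alt s1 s2 = true ↔ ∀ c, (s2.toList.count c : Int) ≤ (s1.toList.count c : Int) := by
  unfold scramble_01_alt
  have hp1 : (PySem.List.sorted s1.toList (fun c => c) false).Perm s1.toList :=
    PySem.List.sorted_perm _ _ _
  have hp2 : (PySem.List.sorted s2.toList (fun c => c) false).Perm s2.toList :=
    PySem.List.sorted_perm _ _ _
  show scrambleMergeB _ _ = true ↔ _
  rw [scrambleMergeB_eq_true_iff _ _ (PySem.List.sorted_pairwise _ _) (PySem.List.sorted_pairwise _ _)]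
  constructor
  · intro h c
    have := h c
    rw [hp1.count_eq, hp2.count_eq] at this
    exact_mod_cast this
  · intro h c
    have := h c
    rw [hp1.count_eq, hp2.count_eq]
    exact_mod_cast this

-- ===== VERDICT (by name: the statement is the Claim_ definition above) =====
theorem scramble_01_spec : Claim_equal_scramble_01 := by
  intro s1 s2 _
  unfold Spec_scramble_01
  have h1 := scramble_01_eq_true_iff s1 s2
  have h2 := scramble_01_alt_eq_true_iff s1 s2
  exact Bool.eq_iff_iff.mpr (h1.trans h2.symm)
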